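-- pv_equiv track=rewrite | github.com/addacub/fourier-images | ImagePoints.py | get_Cn_List
-- ===== SOURCE A (Python) =====
-- def get_Cn_List(constants):
--     """Cycles through the selected number of constants."""
--
--     CnListOrdered = []
--     n = len(constants)
--
--     mid_point = (n - 1) // 2
--     positive = False
--     k = 0  # nth value of constant
--     for i in range(n):
--         if positive:
--             CnListOrdered.append(constants[mid_point + k])
--             positive = False
--         else:
--             CnListOrdered.append(constants[mid_point - k])
--             k += 1
--             positive = True
--
--     return CnListOrdered
-- ===== SOURCE B (Python) =====
-- def get_Cn_List(constants):
--     """Cycles through the selected number of constants."""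
--     mid = (len(constants) - 1) // 2
--     left = constants[:mid + 1][::-1]   # mid, mid-1, ..., 0
--     right = constants[mid + 1:]        # mid+1, ..., n-1
--     out = []
--     for l, r in zip(left, right):
--         out += [l, r]
--     if len(right) < len(left):
--         out.append(left[-1])
--     return out
-- ===== Notes on version B (the rewrite author's own statement) =====
-- stated objective: alternative
-- what changed: Replaces A's single loop with a positive-flag and counter state machine by a slice decomposition: build left = constants[:mid+1][::-1] and right = constants[mid+1:], zip-interleave them and append the odd leftover of left.
import Mathlib
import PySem

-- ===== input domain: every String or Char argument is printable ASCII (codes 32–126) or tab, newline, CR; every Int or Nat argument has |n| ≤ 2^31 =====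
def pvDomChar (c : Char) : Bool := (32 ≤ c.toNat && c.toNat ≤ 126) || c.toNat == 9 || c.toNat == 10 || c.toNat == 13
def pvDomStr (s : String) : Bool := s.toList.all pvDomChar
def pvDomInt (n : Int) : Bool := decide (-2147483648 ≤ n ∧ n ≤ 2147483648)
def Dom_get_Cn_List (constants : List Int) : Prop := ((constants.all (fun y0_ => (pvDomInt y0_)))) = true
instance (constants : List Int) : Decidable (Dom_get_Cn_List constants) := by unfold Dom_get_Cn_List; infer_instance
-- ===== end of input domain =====

-- B replaces A's stateful flag/counter loop by a slice-and-interleave decomposition (two slices zipped together); alternative, same cost.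

-- ===== PORT A =====
-- pyGetD is exact here: every index A forms lies in range (proved below), so Python never raises.
def get_Cn_List (constants : List Int) : List Int :=
  let n : Int := (constants.length : Int)
  let mid_point : Int := PySem.Int.floordiv (n - 1) 2
  ((PySem.List.pyRange 0 n 1).foldl
    (fun (st : List Int × Bool × Int) _ =>
      if st.2.1 then
        (st.1 ++ [PySem.List.pyGetD constants (mid_point + st.2.2) 0], false, st.2.2)
      else
        (st.1 ++ [PySem.List.pyGetD constants (mid_point - st.2.2) 0], true, st.2.2 + 1))
    ([], false, 0)).1

-- ===== PORT B =====
-- left = constants[:mid+1][::-1]; right = constants[mid+1:]; zip-interleave, odd leftover last.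
-- slice? with step -1 is always 'some'; .getD [] is exact. left[-1] is only read when left ≠ [].
def get_Cn_List_alt (constants : List Int) : List Int :=
  let mid : Int := PySem.Int.floordiv ((constants.length : Int) - 1) 2
  let left : List Int :=
    (PySem.List.slice? (PySem.List.slice constants none (some (mid + 1))) none none (-1)).getD []
  let right : List Int := PySem.List.slice constants (some (mid + 1)) none
  let out : List Int := (left.zip right).foldl (fun acc lr => acc ++ [lr.1, lr.2]) []
  if right.length < left.length then out ++ [PySem.List.pyGetD left (-1) 0] else out

-- ===== PRECONDITION & SPEC =====
def Spec_get_Cn_List (constants : List Int) (out : List Int) : Prop := out = get_Cn_List_alt constants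
instance (constants : List Int) (out : List Int) : Decidable (Spec_get_Cn_List constants out) := by unfold Spec_get_Cn_List; infer_instance

-- ===== CLAIM (what is proved, stated in full; the proofs are below) =====
def Claim_equal_get_Cn_List : Prop := ∀ (constants : List Int), Dom_get_Cn_List constants → Spec_get_Cn_List constants (get_Cn_List constants)

-- ===== LEMMAS AND PROOFS =====

-- The element sequence A's loop emits, as a structural recursion on the remaining iteration count.
def genA (xs : List Int) (m : Int) : Nat → Bool → Int → List Int
  | 0, _, _ => []
  | Nat.succ c, pos, k =>
    if pos then PySem.List.pyGetD xs (m + k) 0 :: genA xs m c false k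
    else PySem.List.pyGetD xs (m - k) 0 :: genA xs m c true (k + 1)

-- Interleaving of two lists, left element first, leftovers of the left list appended.
def il : List Int → List Int → List Int
  | [], _ => []
  | a :: L, [] => a :: il L []
  | a :: L, b :: R => a :: b :: il L R

theorem foldA_eq_genA (xs : List Int) (m : Int) (l : List Int) (acc : List Int)
    (pos : Bool) (k : Int) :
    (l.foldl
      (fun (st : List Int × Bool × Int) _ =>
        if st.2.1 then
          (st.1 ++ [PySem.List.pyGetD xs (m + st.2.2) 0], false, st.2.2)
        else
          (st.1 ++ [PySem.List.pyGetD xs (m - st.2.2) 0], true, st.2.2 + 1))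
      (acc, pos, k)).1 = acc ++ genA xs m l.length pos k := by
  induction l generalizing acc pos k with
  | nil => simp [genA]
  | cons a t ih =>
    cases pos <;> simp [List.foldl_cons, genA, ih]

theorem take_rev_head (xs : List Int) (m k : Nat) (hk : k ≤ m) (hm : m < xs.length) :
    (xs.take (m + 1 - k)).reverse
      = PySem.List.pyGetD xs ((m : Int) - (k : Int)) 0 :: (xs.take (m - k)).reverse := by
  have h1 : m + 1 - k = (m - k) + 1 := by omega
  have h2 : m - k < xs.length := by omega
  have h3 : ((m : Int) - (k : Int)) = ((m - k : Nat) : Int) := by omega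
  rw [h1, h3, List.take_add_one, List.getElem?_eq_getElem h2]
  simp [PySem.List.pyGetD_natCast, List.getD_eq_getElem?_getD, List.getElem?_eq_getElem h2]

theorem drop_head (xs : List Int) (m k : Nat) (h : m + 1 + k < xs.length) :
    xs.drop (m + 1 + k)
      = PySem.List.pyGetD xs ((m : Int) + ((k : Int) + 1)) 0 :: xs.drop (m + 2 + k) := by
  have h3 : ((m : Int) + ((k : Int) + 1)) = ((m + 1 + k : Nat) : Int) := by push_cast; ring
  have h4 : m + 1 + k + 1 = m + 2 + k := by omega
  rw [List.drop_eq_getElem_cons h, h4, h3, PySem.List.pyGetD_natCast]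
  congr 1
  simp [List.getD_eq_getElem?_getD, List.getElem?_eq_getElem h]

theorem genA_eq_il (xs : List Int) (m : Nat) (c : Nat) :
    ∀ (k : Nat), m < xs.length → 2 * m + 1 ≤ xs.length → xs.length ≤ 2 * m + 2 →
    k ≤ m + 1 → c = (m + 1 - k) + (xs.length - (m + 1 + k)) →
    genA xs (m : Int) c false (k : Int)
      = il ((xs.take (m + 1 - k)).reverse) (xs.drop (m + 1 + k)) := by
  induction c using Nat.strong_induction_on with
  | _ c ih =>
    intro k hm hlo hhi hk hc
    rcases c with _ | c
    ·
      have h1 : m + 1 - k = 0 := by omega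
      have h2 : xs.length ≤ m + 1 + k := by omega
      rw [h1, List.drop_eq_nil_of_le h2]
      simp [genA, il]
    rcases c with _ | c
    ·
      have hkm : k = m := by omega
      have hlen : xs.length = 2 * m + 1 := by omega
      rw [hkm, take_rev_head xs m m (le_refl m) hm]
      have h2 : xs.length ≤ m + 1 + m := by omega
      rw [List.drop_eq_nil_of_le h2]
      have h3 : m - m = 0 := by omega
      rw [h3]
      simp [genA, il]
    ·
      have hL : 1 ≤ m + 1 - k := by omega
      have hR : m + 1 + k < xs.length := by omega
      have hkm : k ≤ m := by omega
      rw [take_rev_head xs m k hkm hm, drop_head xs m k hR]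
      have e1 : genA xs (m : Int) (c + 2) false (k : Int)
          = PySem.List.pyGetD xs ((m : Int) - (k : Int)) 0
            :: PySem.List.pyGetD xs ((m : Int) + ((k : Int) + 1)) 0
            :: genA xs (m : Int) c false ((k : Int) + 1) := by
        simp [genA]
      rw [e1, il]
      have e2 : ((k : Int) + 1) = (((k + 1 : Nat)) : Int) := by omega
      rw [e2, ih c (by omega) (k + 1) hm hlo hhi (by omega) (by omega)]
      have e3 : m + 1 - (k + 1) = m - k := by omega
      have e4 : m + 1 + (k + 1) = m + 2 + k := by omega
      rw [e3, e4]

theorem pyGetD_neg_one_last (xs : List Int) (h : xs ≠ []) :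
    PySem.List.pyGetD xs (-1) 0 = xs.getLast?.getD 0 := by
  have h1 : 1 ≤ xs.length := by cases xs <;> simp_all
  simp [PySem.List.pyGetD, PySem.List.pyGet?, PySem.List.pyIdx?, h1, List.getLast?_eq_getElem?]

theorem il_eq_zipflat (L : List Int) :
    ∀ (R : List Int), R.length ≤ L.length → L.length ≤ R.length + 1 →
    il L R = (L.zip R).flatMap (fun lr => [lr.1, lr.2])
      ++ (if R.length < L.length then [PySem.List.pyGetD L (-1) 0] else []) := by
  induction L with
  | nil =>
    intro R h1 h2
    have : R = [] := by cases R <;> simp_all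
    subst this
    simp [il]
  | cons a L ih =>
    intro R h1 h2
    cases R with
    | nil =>
      have hL : L = [] := by cases L <;> simp_all
      subst hL
      simp [il, pyGetD_neg_one_last]
    | cons b R =>
      have hlen1 : R.length ≤ L.length := by simp at h1; omega
      have hlen2 : L.length ≤ R.length + 1 := by simp at h2; omega
      rw [il, ih R hlen1 hlen2]
      simp only [List.zip_cons_cons, List.flatMap_cons, List.length_cons]
      have hcond : (R.length + 1 < L.length + 1) ↔ (R.length < L.length) := by omega
      by_cases hlt : R.length < L.length
      · rw [if_pos hlt, if_pos (hcond.mpr hlt)]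
        have hLne : L ≠ [] := by intro h; subst h; simp at hlt
        rw [pyGetD_neg_one_last L hLne, pyGetD_neg_one_last (a :: L) (by simp)]
        have hlast : (a :: L).getLast? = L.getLast? := by
          cases L with
          | nil => exact absurd rfl hLne
          | cons x xs => simp
        rw [hlast]
        simp
      · rw [if_neg hlt, if_neg (fun h => hlt (hcond.mp h))]
        simp

-- ===== VERDICT (by name: the statement is the Claim_ definition above) =====
theorem get_Cn_List_spec : Claim_equal_get_Cn_List := by
  intro constants _
  unfold Spec_get_Cn_List
  cases hnil : constants with
  | nil => rfl
  | cons c0 cs =>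
    rw [← hnil]
    have hn1 : 1 ≤ constants.length := by rw [hnil]; simp
    set n0 := constants.length with hn0
    set m : Nat := (n0 - 1) / 2 with hmdef
    have hmid : PySem.Int.floordiv ((n0 : Int) - 1) 2 = (m : Int) := by
      have e : ((n0 : Int) - 1) = ((n0 - 1 : Nat) : Int) := by omega
      rw [e]
      exact_mod_cast PySem.Int.floordiv_natCast (n0 - 1) 2
    have hm : m < n0 := by omega
    have hlo : 2 * m + 1 ≤ n0 := by omega
    have hhi : n0 ≤ 2 * m + 2 := by omega
    -- evaluate A
    have hA : get_Cn_List constants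
        = il ((constants.take (m + 1)).reverse) (constants.drop (m + 1)) := by
      show ((PySem.List.pyRange 0 (constants.length : Int) 1).foldl _ ([], false, 0)).1 = _
      rw [hmid, foldA_eq_genA constants (m : Int) _ [] false 0]
      rw [PySem.List.length_pyRange_one]
      have hcnt : ((n0 : Int) - 0).toNat = n0 := by omega
      rw [hcnt]
      have h0 : ((0 : Nat) : Int) = (0 : Int) := by norm_num
      rw [← h0, genA_eq_il constants m n0 0 hm hlo hhi (by omega) (by omega)]
      simp
    -- evaluate B
    have hmid1 : (m : Int) + 1 = ((m + 1 : Nat) : Int) := by omega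
    have hB : get_Cn_List_alt constants
        = ((constants.take (m + 1)).reverse.zip (constants.drop (m + 1))).foldl
            (fun acc lr => acc ++ [lr.1, lr.2]) []
          ++ (if (constants.drop (m + 1)).length < (constants.take (m + 1)).reverse.length
              then [PySem.List.pyGetD (constants.take (m + 1)).reverse (-1) 0] else []) := by
      simp only [get_Cn_List_alt]
      rw [← hn0, hmid, hmid1]
      rw [PySem.List.slice_to_natCast, PySem.List.slice_from_natCast,
          PySem.List.slice?_none_none_neg_one]
      simp only [Option.getD_some]
      rw [PySem.List.foldl_append_eq_flatMap]
      split_ifs <;> simp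
    rw [hA, hB, PySem.List.foldl_append_eq_flatMap]
    have hlenL : (constants.take (m + 1)).reverse.length = m + 1 := by
      simp; omega
    have hlenR : (constants.drop (m + 1)).length = n0 - (m + 1) := by simp [← hn0]
    rw [il_eq_zipflat _ _ (by rw [hlenL, hlenR]; omega) (by rw [hlenL, hlenR]; omega)]
    simp
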